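-- pv_equiv track=rewrite | github.com/resilient-tech/india-compliance | india_compliance/gst_india/utils/jinja.py | get_non_zero_fields
-- ===== SOURCE A (Python) =====
-- def get_non_zero_fields(data, fields):
--     """Returns a list of fields with non-zero values"""
--
--     if isinstance(data, dict):
--         data = [data]
--
--     non_zero_fields = set()
--
--     for row in data:
--         for field in fields:
--             if field not in non_zero_fields and row.get(field, 0) != 0:
--                 non_zero_fields.add(field)
--
--     return non_zero_fields
-- ===== SOURCE B (Python) =====
-- def get_non_zero_fields(data, fields):
--     """Returns a list of fields with non-zero values"""
--
--     if isinstance(data, dict):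
--         data = [data]
--     rows = list(data)
--
--     if not rows:
--         return set()
--
--     first, rest = rows[0], rows[1:]
--     return {field for field in fields if first.get(field, 0) != 0} | get_non_zero_fields(rest, fields)
-- ===== Notes on version B (the rewrite author's own statement) =====
-- stated objective: alternative
-- what changed: B replaces A's iterative left fold with a membership-guarded mutable accumulator set by structural recursion on the rows: the non-zero fields of the first row (a set comprehension) are united with the recursively computed result for the remaining rows, so there is no running accumulator and no membership test at all.
import Mathlib
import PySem

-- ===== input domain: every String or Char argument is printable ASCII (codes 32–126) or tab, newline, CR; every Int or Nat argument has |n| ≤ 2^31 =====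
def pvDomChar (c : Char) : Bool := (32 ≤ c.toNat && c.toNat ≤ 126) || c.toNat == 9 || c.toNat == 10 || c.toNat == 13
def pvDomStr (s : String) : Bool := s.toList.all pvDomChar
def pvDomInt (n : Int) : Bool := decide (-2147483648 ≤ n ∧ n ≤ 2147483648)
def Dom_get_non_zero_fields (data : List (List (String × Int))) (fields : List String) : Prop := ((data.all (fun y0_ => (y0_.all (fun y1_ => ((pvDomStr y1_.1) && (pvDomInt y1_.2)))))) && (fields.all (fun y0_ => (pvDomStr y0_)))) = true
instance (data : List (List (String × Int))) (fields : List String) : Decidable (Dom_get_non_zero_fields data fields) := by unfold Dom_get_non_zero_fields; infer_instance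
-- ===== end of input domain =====

-- B recurses on the rows (first row's non-zero fields united with the recursive result for the rest)
-- instead of A's left fold with a membership-guarded mutable accumulator set (objective: alternative).
-- The isinstance(data, dict) wrapping branch is not representable under the type convention
-- (data is always a list of dicts here).

-- ===== PORT A =====
def get_non_zero_fields (data : List (List (String × Int))) (fields : List String) : List String :=
  data.foldl (fun non_zero_fields row =>
      fields.foldl (fun non_zero_fields field =>
          if (!PySem.Set.contains non_zero_fields field
              && (PySem.Dict.getD (PySem.Dict.mk row) field 0 != 0)) then
            PySem.Set.add non_zero_fields field
          else non_zero_fields)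
        non_zero_fields)
    PySem.Set.empty

-- ===== PORT B =====
def get_non_zero_fields_alt (data : List (List (String × Int))) (fields : List String) : List String :=
  match data with
  | [] => PySem.Set.empty
  | first :: rest =>
      PySem.Set.union
        (PySem.Set.ofList (fields.filter (fun field => PySem.Dict.getD (PySem.Dict.mk first) field 0 != 0)))
        (get_non_zero_fields_alt rest fields)

-- ===== PRECONDITION & SPEC =====
def Spec_get_non_zero_fields (data : List (List (String × Int))) (fields : List String) (out : List String) : Prop := out = get_non_zero_fields_alt data fields
instance (data : List (List (String × Int))) (fields : List String) (out : List String) : Decidable (Spec_get_non_zero_fields data fields out) := by unfold Spec_get_non_zero_fields; infer_instance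

-- ===== CLAIM (what is proved, stated in full; the proofs are below) =====
def Claim_equal_get_non_zero_fields : Prop := ∀ (data : List (List (String × Int))) (fields : List String), Dom_get_non_zero_fields data fields → Spec_get_non_zero_fields data fields (get_non_zero_fields data fields)

-- ===== LEMMAS AND PROOFS =====

-- folding `Set.add` over `Set.add acc x` is adding x after folding over acc
theorem pv_foldl_add_add {α : Type} [BEq α] [LawfulBEq α] (s acc : PySem.Set α) (x : α) :
    List.foldl PySem.Set.add s (PySem.Set.add acc x)
      = PySem.Set.add (List.foldl PySem.Set.add s acc) x := by
  by_cases hx : x ∈ acc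
  · rw [PySem.Set.add_of_mem hx, PySem.Set.add_of_mem]
    have : x ∈ PySem.Set.update s acc := by
      rw [PySem.Set.mem_update]; exact Or.inr hx
    exact this
  · rw [PySem.Set.add_of_not_mem hx, List.foldl_append]
    rfl

-- fold-add associates: folding over (foldl add acc l) is folding over acc, then over l
theorem pv_foldl_add_assoc {α : Type} [BEq α] [LawfulBEq α] (l : List α) (s acc : PySem.Set α) :
    List.foldl PySem.Set.add s (List.foldl PySem.Set.add acc l)
      = List.foldl PySem.Set.add (List.foldl PySem.Set.add s acc) l := by
  induction l generalizing acc with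
  | nil => rfl
  | cons x l ih =>
      simp only [List.foldl_cons]
      rw [ih (PySem.Set.add acc x), pv_foldl_add_add]

-- union associates
theorem pv_union_assoc {α : Type} [BEq α] [LawfulBEq α] (s t u : PySem.Set α) :
    PySem.Set.union (PySem.Set.union s t) u = PySem.Set.union s (PySem.Set.union t u) := by
  show List.foldl PySem.Set.add (List.foldl PySem.Set.add s t) u
      = List.foldl PySem.Set.add s (List.foldl PySem.Set.add t u)
  rw [pv_foldl_add_assoc]

-- s | set(l)  =  fold add over the raw list l
theorem pv_union_ofList {α : Type} [BEq α] [LawfulBEq α] (s : PySem.Set α) (l : List α) :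
    PySem.Set.union s (PySem.Set.ofList l) = List.foldl PySem.Set.add s l := by
  show List.foldl PySem.Set.add s (List.foldl PySem.Set.add PySem.Set.empty l)
      = List.foldl PySem.Set.add s l
  rw [pv_foldl_add_assoc]
  rfl

-- A's guarded inner loop is fold-add over the filtered list
theorem pv_inner_eq_filter {α : Type} [BEq α] [LawfulBEq α] (p : α → Bool) (l : List α) (s : PySem.Set α) :
    l.foldl (fun s f => if (!PySem.Set.contains s f && p f) then PySem.Set.add s f else s) s
      = (l.filter p).foldl PySem.Set.add s := by
  induction l generalizing s with
  | nil => rfl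
  | cons f l ih =>
      simp only [List.foldl_cons, List.filter_cons]
      cases hp : p f with
      | false => simp only [Bool.and_false, Bool.false_eq_true, if_false]; exact ih s
      | true =>
          simp only [Bool.and_true, if_pos]
          cases hc : PySem.Set.contains s f with
          | true =>
              have hm : f ∈ s := (PySem.Set.contains_iff s f).mp hc
              simp only [Bool.not_true, Bool.false_eq_true, if_false, List.foldl_cons,
                PySem.Set.add_of_mem hm]
              exact ih s
          | false =>
              simp only [Bool.not_false, if_pos, List.foldl_cons]
              exact ih (PySem.Set.add s f)

-- A's outer fold started at any set s equals s united with B's recursive result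
theorem pv_foldl_eq_union_alt (data : List (List (String × Int))) (fields : List String)
    (s : PySem.Set String) :
    data.foldl (fun non_zero_fields row =>
        fields.foldl (fun non_zero_fields field =>
            if (!PySem.Set.contains non_zero_fields field
                && (PySem.Dict.getD (PySem.Dict.mk row) field 0 != 0)) then
              PySem.Set.add non_zero_fields field
            else non_zero_fields)
          non_zero_fields) s
      = PySem.Set.union s (get_non_zero_fields_alt data fields) := by
  induction data generalizing s with
  | nil => rfl
  | cons first rest ih =>
      simp only [List.foldl_cons]
      rw [pv_inner_eq_filter, ← pv_union_ofList, ih, pv_union_assoc]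
      rfl

-- ===== VERDICT (by name: the statement is the Claim_ definition above) =====
theorem get_non_zero_fields_spec : Claim_equal_get_non_zero_fields := by
  intro data fields _
  show get_non_zero_fields data fields = get_non_zero_fields_alt data fields
  unfold get_non_zero_fields
  rw [pv_foldl_eq_union_alt]
  show List.foldl PySem.Set.add PySem.Set.empty (get_non_zero_fields_alt data fields)
      = get_non_zero_fields_alt data fields
  show PySem.Set.ofList (get_non_zero_fields_alt data fields) = get_non_zero_fields_alt data fields
  apply PySem.Set.ofList_eq_self_of_nodup
  induction data with
  | nil => exact List.nodup_nil
  | cons first rest ih =>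
      exact PySem.Set.nodup_union _ _ (PySem.Set.nodup_ofList _)
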